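-- pv_equiv track=rewrite | github.com/swaupd/aaroth | backend/app.py | increment_uuid
-- ===== SOURCE A (Python) =====
-- def increment_uuid(uuid):
--     uuid_chars = list(uuid)
--     for i in range(len(uuid_chars) - 1, -1, -1):
--         if uuid_chars[i] == 'Z':
--             uuid_chars[i] = '0'
--         else:
--             uuid_chars[i] = chr(ord(uuid_chars[i]) + 1)
--             break
--     return ''.join(uuid_chars)
-- ===== SOURCE B (Python) =====
-- def increment_uuid(uuid):
--     prefix = uuid.rstrip('Z')
--     z = len(uuid) - len(prefix)
--     if not prefix:
--         return '0' * len(uuid)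
--     return prefix[:-1] + chr(ord(prefix[-1]) + 1) + '0' * z
-- ===== Notes on version B (the rewrite author's own statement) =====
-- stated objective: simpler
-- what changed: Replaces the right-to-left index loop with carry by a single rstrip('Z') to find the trailing run of Z's, then rebuilds the result by slicing: bump the last non-Z character and append that many '0's.
import Mathlib
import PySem

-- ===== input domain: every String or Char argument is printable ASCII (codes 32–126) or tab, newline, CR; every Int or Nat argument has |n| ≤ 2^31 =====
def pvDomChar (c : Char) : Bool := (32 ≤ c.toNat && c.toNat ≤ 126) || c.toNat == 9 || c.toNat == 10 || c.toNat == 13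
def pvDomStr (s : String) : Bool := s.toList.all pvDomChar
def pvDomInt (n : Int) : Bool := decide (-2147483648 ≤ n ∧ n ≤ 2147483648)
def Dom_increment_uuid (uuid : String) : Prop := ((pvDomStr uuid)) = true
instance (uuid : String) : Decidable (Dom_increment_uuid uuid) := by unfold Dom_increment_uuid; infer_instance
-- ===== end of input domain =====

-- B replaces A's right-to-left carry loop by rstrip('Z') + slice rebuild (simpler decomposition, same cost).

-- ===== PORT A =====
-- A walks the character list from the right: each 'Z' becomes '0'; the first
-- non-'Z' is bumped and the loop breaks (the rest of the list is kept as is).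
-- We model the backwards index loop as structural recursion on the reversed list.
def incA_go : List Char → List Char
  | [] => []
  | c :: rest =>
      if c = 'Z' then '0' :: incA_go rest
      else Char.ofNat (c.toNat + 1) :: rest

def increment_uuid (uuid : String) : String :=
  String.mk ((incA_go uuid.toList.reverse).reverse)

-- ===== PORT B =====
-- B: prefix = uuid.rstrip('Z') (here: drop the trailing run of 'Z' via
-- dropWhile on the reversed list); if prefix is empty return '0'*len(uuid),
-- else prefix[:-1] + chr(ord(prefix[-1])+1) + '0'*z.
def increment_uuid_alt (uuid : String) : String :=
  let l := uuid.toList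
  match l.reverse.dropWhile (fun c => c = 'Z') with
  | [] => String.mk (List.replicate l.length '0')        -- prefix empty: all zeros
  | c :: rest =>                                          -- prefix = (c::rest).reverse
      String.mk (rest.reverse ++ Char.ofNat (c.toNat + 1) ::
        List.replicate (l.length - (rest.length + 1)) '0')

-- ===== PRECONDITION & SPEC =====
def Spec_increment_uuid (uuid : String) (out : String) : Prop := out = increment_uuid_alt uuid
instance (uuid : String) (out : String) : Decidable (Spec_increment_uuid uuid out) := by unfold Spec_increment_uuid; infer_instance

-- ===== CLAIM (what is proved, stated in full; the proofs are below) =====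
def Claim_equal_increment_uuid : Prop := ∀ (uuid : String), Dom_increment_uuid uuid → Spec_increment_uuid uuid (increment_uuid uuid)

-- ===== LEMMAS AND PROOFS =====

-- Characterisation of A's loop on the reversed list in terms of dropWhile.
theorem incA_go_eq (r : List Char) :
    incA_go r =
      match r.dropWhile (fun c => c = 'Z') with
      | [] => List.replicate r.length '0'
      | c :: rest => List.replicate (r.length - (rest.length + 1)) '0' ++
          Char.ofNat (c.toNat + 1) :: rest := by
  induction r with
  | nil => simp [incA_go]
  | cons c rest ih =>
      by_cases hc : c = 'Z'
      · have hlen := List.length_dropWhile_le (p := fun c => c = 'Z') (l := rest)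
        simp only [incA_go, hc, List.dropWhile, decide_true, ih]
        cases hdw : rest.dropWhile (fun c => c = 'Z') with
        | nil => simp [List.replicate_succ]
        | cons c' rest' =>
            rw [hdw] at hlen
            simp only [List.length_cons]
            have : rest.length + 1 - (rest'.length + 1) =
                (rest.length - (rest'.length + 1)) + 1 := by
              simp only [List.length_cons] at hlen; omega
            rw [this, List.replicate_succ]
            simp
      · simp [incA_go, hc, List.dropWhile]

theorem increment_uuid_eq (uuid : String) :
    increment_uuid uuid = increment_uuid_alt uuid := by
  unfold increment_uuid increment_uuid_alt
  rw [incA_go_eq]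
  cases hdw : uuid.toList.reverse.dropWhile (fun c => c = 'Z') with
  | nil => simp only [hdw]; simp
  | cons c rest => simp only [hdw]; simp [List.reverse_append]

-- ===== VERDICT (by name: the statement is the Claim_ definition above) =====
theorem increment_uuid_spec : Claim_equal_increment_uuid := by
  intro uuid _
  unfold Spec_increment_uuid
  exact increment_uuid_eq uuid
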